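-- pv_equiv track=rewrite | github.com/chris-at-fabius-labs/advent-of-code-2022 | day-9/solution.py | reconcile_knot
-- ===== SOURCE A (Python) =====
-- VECTORS = {
--     "U": (0, +1),
--     "D": (0, -1),
--     "L": (-1, 0),
--     "R": (+1, 0),
--     "UL": (-1, +1),
--     "UR": (+1, +1),
--     "DL": (-1, -1),
--     "DR": (+1, -1),
--     "Z": (0, 0)
-- }
--
-- def get_vectors(directions):
--     return [VECTORS.get(d) for d in directions]
--
-- def move_point(point, vector, distance = 1):
--     return (
--         point[0] + (vector[0] * distance),
--         point[1] + (vector[1] * distance)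
--     )
--
-- def is_valid_knot_point(leader, follower):
--     for vector in VECTORS.values():
--         if move_point(leader, vector) == follower:
--             return True
--     return False
--
-- def reconcile_knot(leader, follower):
--     if is_valid_knot_point(leader, follower): return follower
--     for cardinal_vector in get_vectors(["U", "D", "L", "R"]):
--         if leader == move_point(follower, cardinal_vector, 2):
--             return move_point(follower, cardinal_vector, 1)
--     for diagonal_vector in get_vectors(["UL", "UR", "DL", "DR"]):
--         check_point = move_point(follower, diagonal_vector, 1)
--         if is_valid_knot_point(leader, check_point):
--             return check_point
--     raise Exception("Unable to reconcile knot", leader, follower)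
-- ===== SOURCE B (Python) =====
-- def reconcile_knot(leader, follower):
--     dx = leader[0] - follower[0]
--     dy = leader[1] - follower[1]
--     if dx in (-1, 0, 1) and dy in (-1, 0, 1):
--         return follower
--     nf = (follower[0] + (dx > 0) - (dx < 0), follower[1] + (dy > 0) - (dy < 0))
--     if leader[0] - nf[0] in (-1, 0, 1) and leader[1] - nf[1] in (-1, 0, 1):
--         return nf
--     raise Exception("Unable to reconcile knot", leader, follower)
-- ===== Notes on version B (the rewrite author's own statement) =====
-- stated objective: simpler
-- what changed: B classifies the difference vector (dx,dy) arithmetically and moves the follower one signum step, instead of A's enumeration of the nine neighbour offsets plus two candidate-point search loops.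
import Mathlib
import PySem

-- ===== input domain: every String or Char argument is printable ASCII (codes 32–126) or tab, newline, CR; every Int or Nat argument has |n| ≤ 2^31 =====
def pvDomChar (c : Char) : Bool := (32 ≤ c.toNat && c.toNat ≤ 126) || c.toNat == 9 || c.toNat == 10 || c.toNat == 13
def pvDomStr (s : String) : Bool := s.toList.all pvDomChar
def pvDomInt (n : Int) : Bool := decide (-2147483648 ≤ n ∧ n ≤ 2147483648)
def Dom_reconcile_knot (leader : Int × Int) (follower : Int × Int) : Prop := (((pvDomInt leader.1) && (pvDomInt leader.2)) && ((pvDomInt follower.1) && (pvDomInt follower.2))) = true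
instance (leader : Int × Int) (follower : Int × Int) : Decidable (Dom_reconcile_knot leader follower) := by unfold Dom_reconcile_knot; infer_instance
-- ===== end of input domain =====

-- B replaces A's nine-offset enumeration and candidate-search loops by a signum-step computation
-- on the difference vector (simpler; both raise on gaps > 2, excluded by Pre_).

-- ===== PORT A =====
-- VECTORS.values() in insertion order
def pvVectors : List (Int × Int) :=
  [(0, 1), (0, -1), (-1, 0), (1, 0), (-1, 1), (1, 1), (-1, -1), (1, -1), (0, 0)]

def pv_move_point (point : Int × Int) (vector : Int × Int) (distance : Int) : Int × Int :=
  (point.1 + vector.1 * distance, point.2 + vector.2 * distance)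

-- for vector in VECTORS.values(): if move_point(leader, vector) == follower: return True
def pv_is_valid_knot_point (leader : Int × Int) (follower : Int × Int) : Bool :=
  pvVectors.any (fun v => pv_move_point leader v 1 == follower)

-- the cardinal for-loop with early return
def pv_card_loop (leader : Int × Int) (follower : Int × Int) : List (Int × Int) → Option (Int × Int)
  | [] => none
  | v :: rest =>
    if leader = pv_move_point follower v 2 then some (pv_move_point follower v 1)
    else pv_card_loop leader follower rest

-- the diagonal for-loop with early return
def pv_diag_loop (leader : Int × Int) (follower : Int × Int) : List (Int × Int) → Option (Int × Int)
  | [] => none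
  | v :: rest =>
    let check_point := pv_move_point follower v 1
    if pv_is_valid_knot_point leader check_point then some check_point
    else pv_diag_loop leader follower rest

def reconcile_knot (leader : Int × Int) (follower : Int × Int) : Int × Int :=
  if pv_is_valid_knot_point leader follower then follower
  else
    match pv_card_loop leader follower [(0, 1), (0, -1), (-1, 0), (1, 0)] with
    | some p => p
    | none =>
      match pv_diag_loop leader follower [(-1, 1), (1, 1), (-1, -1), (1, -1)] with
      | some p => p
      | none => (0, 0)  -- Python raises Exception here; excluded by Pre_

-- ===== PORT B =====
def reconcile_knot_alt (leader : Int × Int) (follower : Int × Int) : Int × Int :=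
  let dx := leader.1 - follower.1
  let dy := leader.2 - follower.2
  if (dx == -1 || dx == 0 || dx == 1) && (dy == -1 || dy == 0 || dy == 1) then follower
  else
    let sx : Int := (if dx > 0 then 1 else 0) - (if dx < 0 then 1 else 0)
    let sy : Int := (if dy > 0 then 1 else 0) - (if dy < 0 then 1 else 0)
    let nf := (follower.1 + sx, follower.2 + sy)
    if (leader.1 - nf.1 == -1 || leader.1 - nf.1 == 0 || leader.1 - nf.1 == 1) &&
       (leader.2 - nf.2 == -1 || leader.2 - nf.2 == 0 || leader.2 - nf.2 == 1) then nf
    else (0, 0)  -- Python raises Exception here; excluded by Pre_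

-- ===== PRECONDITION & SPEC =====
-- Pre_ excludes exactly the inputs with a gap greater than 2 in either coordinate, on which
-- Python A raises Exception("Unable to reconcile knot", ...) (and B raises the same).
def Pre_reconcile_knot (leader : Int × Int) (follower : Int × Int) : Prop :=
  -2 ≤ leader.1 - follower.1 ∧ leader.1 - follower.1 ≤ 2 ∧
  -2 ≤ leader.2 - follower.2 ∧ leader.2 - follower.2 ≤ 2
instance (leader : Int × Int) (follower : Int × Int) : Decidable (Pre_reconcile_knot leader follower) := by
  unfold Pre_reconcile_knot; infer_instance

def pvWitness_reconcile_knot : (Int × Int) × (Int × Int) := ((3, 1), (1, 0))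

def Spec_reconcile_knot (leader : Int × Int) (follower : Int × Int) (out : Int × Int) : Prop := out = reconcile_knot_alt leader follower
instance (leader : Int × Int) (follower : Int × Int) (out : Int × Int) : Decidable (Spec_reconcile_knot leader follower out) := by unfold Spec_reconcile_knot; infer_instance

-- ===== CLAIM (what is proved, stated in full; the proofs are below) =====
def Claim_equal_reconcile_knot : Prop := ∀ (leader : Int × Int) (follower : Int × Int), Dom_reconcile_knot leader follower → Pre_reconcile_knot leader follower → Spec_reconcile_knot leader follower (reconcile_knot leader follower)

-- ===== LEMMAS AND PROOFS =====
set_option maxHeartbeats 1600000 in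
lemma reconcile_key (a b dx dy : Int)
    (hx1 : -2 ≤ dx) (hx2 : dx ≤ 2) (hy1 : -2 ≤ dy) (hy2 : dy ≤ 2) :
    reconcile_knot (a + dx, b + dy) (a, b) = reconcile_knot_alt (a + dx, b + dy) (a, b) := by
  interval_cases dx <;> interval_cases dy <;>
    simp [reconcile_knot, reconcile_knot_alt, pv_is_valid_knot_point, pv_card_loop,
      pv_diag_loop, pv_move_point, pvVectors, Prod.ext_iff] <;>
    first
      | rfl
      | omega
      | (constructor <;> omega)
      | (split_ifs <;> simp_all <;> omega)

-- ===== VERDICT (by name: the statement is the Claim_ definition above) =====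
theorem reconcile_knot_spec : Claim_equal_reconcile_knot := by
  intro l f _ hpre
  obtain ⟨hx1, hx2, hy1, hy2⟩ := hpre
  have h := reconcile_key f.1 f.2 (l.1 - f.1) (l.2 - f.2) hx1 hx2 hy1 hy2
  have hl : (f.1 + (l.1 - f.1), f.2 + (l.2 - f.2)) = l := by
    cases l; cases f; simp only [Prod.mk.injEq]; omega
  rw [hl] at h
  exact h
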